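-- pv_equiv track=rewrite | github.com/DednaKrAZe/RSA_encrypting | RSA.py | encrypting
-- ===== SOURCE A (Python) =====
-- def gcdex(a,b):
--     if b==0:
--         return a,1,0
--     else:
--         d,x,y=gcdex(b,a%b)
--         return d,y,x-y*(a//b)
--
-- def keys():
--     p=29873
--     q=96959
--     n=p*q
--     eiler=(p-1)*(q-1)
--     ex=257
--     d=gcdex(eiler,ex)[2]%eiler
--     openkey=[ex,n]
--     secretkey=[d,n]
--     return [openkey,secretkey]
--
-- def degree(x,e,n):
--     if (e==0):
--         return 1
--     z=degree(x,e//2,n)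
--     if (e%2==0):
--         return (z*z)%n
--     else:
--         return (x*z*z)%n
--
-- def encrypting(text):
--     key=keys()[0]
--     crypted=''
--     for i in text:
--         x=ord(i)
--         xnew=degree(x,key[0],key[1])
--         crypted+=str(xnew)+"|"
--     return crypted
-- ===== SOURCE B (Python) =====
-- def powmod(x, e, n):
--     # iterative bit-scanning modular exponentiation
--     result = 1
--     base = x % n
--     while e > 0:
--         if e & 1:
--             result = result * base % n
--         base = base * base % n
--         e >>= 1
--     return result
--
-- def encrypting(text):
--     # only the public key (257, p*q) is needed to encrypt; it is a constant
--     n = 29873 * 96959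
--     return ''.join(str(powmod(ord(c), 257, n)) + '|' for c in text)
-- ===== Notes on version B (the rewrite author's own statement) =====
-- stated objective: simpler
-- what changed: B drops the gcdex/keys machinery (encryption needs only the constant public key 257 and n=p*q), replaces the recursive degree() with an iterative bit-scanning powmod loop, and builds the output with a join instead of string-concatenation accumulation.
import Mathlib
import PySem

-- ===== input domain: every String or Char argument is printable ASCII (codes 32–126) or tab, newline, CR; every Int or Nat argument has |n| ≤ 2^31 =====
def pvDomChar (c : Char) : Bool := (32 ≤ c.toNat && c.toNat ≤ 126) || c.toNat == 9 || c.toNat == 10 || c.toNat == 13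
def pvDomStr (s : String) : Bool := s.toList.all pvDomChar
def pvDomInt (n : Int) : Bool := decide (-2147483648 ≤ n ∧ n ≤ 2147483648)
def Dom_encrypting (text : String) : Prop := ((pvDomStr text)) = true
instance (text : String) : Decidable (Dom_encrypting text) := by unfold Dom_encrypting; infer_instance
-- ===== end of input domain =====

-- B drops the key-generation machinery (encrypting only uses the constant public key
-- 257 and n = p*q), uses an iterative bit-scan powmod instead of the recursive
-- degree(), and joins per-character pieces instead of '+=' accumulation; same value.

-- ===== PORT A =====
-- gcdex(a,b): recursive extended Euclid with Python // and %
def gcdexA (a b : Int) : Int × Int × Int :=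
  if hb : b = 0 then (a, 1, 0)
  else
    let r := gcdexA b (PySem.Int.mod a b)
    (r.1, r.2.2, r.2.1 - r.2.2 * (PySem.Int.floordiv a b))
termination_by b.natAbs
decreasing_by
  rcases lt_trichotomy b 0 with h | h | h
  · have := PySem.Int.mod_neg_bounds a h; omega
  · exact absurd h hb
  · have h1 := PySem.Int.mod_nonneg a h; have h2 := PySem.Int.mod_lt a h; omega

-- keys(): fixed key material, as in A
def keysA : List (List Int) :=
  let p : Int := 29873
  let q : Int := 96959
  let n := p * q
  let eiler := (p - 1) * (q - 1)
  let ex : Int := 257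
  let d := PySem.Int.mod (gcdexA eiler ex).2.2 eiler
  [[ex, n], [d, n]]

-- degree(x,e,n): recursion on e//2.  The exponent is taken as Nat: degree is only
-- called with the literal 257 (Python diverges on a negative exponent), and for a
-- nonnegative exponent Python's e//2 and e%2 are exactly Nat's e/2 and e%2.
def degreeA (x : Int) (e : Nat) (n : Int) : Int :=
  if e = 0 then 1
  else
    let z := degreeA x (e / 2) n
    if e % 2 = 0 then PySem.Int.mod (z * z) n
    else PySem.Int.mod (x * z * z) n

-- per-character loop: crypted += str(xnew) + "|"
def encrypting (text : String) : String :=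
  let key := PySem.List.pyGetD keysA 0 []
  let crypted := text.toList.foldl
    (fun acc c =>
      let x : Int := c.toNat
      let xnew := degreeA x (PySem.List.pyGetD key 0 0).toNat (PySem.List.pyGetD key 1 0)
      acc ++ PySem.Int.toChars xnew ++ ['|'])
    []
  String.mk crypted

-- ===== PORT B =====
-- powmod(x,e,n): iterative bit-scan loop over the exponent.  The exponent is taken
-- as Nat (only ever called with 257); for nonnegative e, Python's e & 1 and e >>= 1
-- are exactly Nat's e % 2 and e / 2.
def powmodLoop (e : Nat) (result base n : Int) : Int :=
  if e = 0 then result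
  else
    let result' := if e % 2 = 1 then PySem.Int.mod (result * base) n else result
    let base' := PySem.Int.mod (base * base) n
    powmodLoop (e / 2) result' base' n

def powmodB (x : Int) (e : Nat) (n : Int) : Int :=
  powmodLoop e 1 (PySem.Int.mod x n) n

-- ''.join(str(powmod(ord(c), 257, n)) + '|' for c in text)
def encrypting_alt (text : String) : String :=
  let n : Int := 29873 * 96959
  String.mk (text.toList.flatMap (fun c => PySem.Int.toChars (powmodB (c.toNat : Int) 257 n) ++ ['|']))

-- ===== PRECONDITION & SPEC =====
def Spec_encrypting (text : String) (out : String) : Prop := out = encrypting_alt text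
instance (text : String) (out : String) : Decidable (Spec_encrypting text out) := by unfold Spec_encrypting; infer_instance

-- ===== CLAIM (what is proved, stated in full; the proofs are below) =====
def Claim_equal_encrypting : Prop := ∀ (text : String), Dom_encrypting text → Spec_encrypting text (encrypting text)

-- ===== LEMMAS AND PROOFS =====

-- (a % n)^k % n = a^k % n
theorem pow_emod' (a n : Int) (k : Nat) : (a % n) ^ k % n = a ^ k % n :=
  Int.ModEq.pow k (Int.emod_emod_of_dvd a dvd_rfl)

-- degreeA computes x^e mod n (positive modulus, positive exponent)
theorem degreeA_eq_pow (n : Int) (hn : 0 < n) :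
    ∀ e : Nat, 0 < e → ∀ x : Int, degreeA x e n = (x ^ e) % n := by
  intro e
  induction e using Nat.strong_induction_on with
  | _ e ih =>
    intro he x
    rw [degreeA, if_neg (by omega : ¬ e = 0)]
    by_cases h1 : e / 2 = 0
    · have he1 : e = 1 := by omega
      subst he1
      simp [degreeA, PySem.Int.mod_eq_emod_of_pos hn]
    · have hlt : e / 2 < e := Nat.div_lt_self he (by norm_num)
      have hz := ih (e / 2) hlt (by omega) x
      simp only [hz, PySem.Int.mod_eq_emod_of_pos hn]
      rcases Nat.mod_two_eq_zero_or_one e with h | h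
      · rw [if_pos h]
        calc x ^ (e / 2) % n * (x ^ (e / 2) % n) % n
            = x ^ (e / 2) * x ^ (e / 2) % n := by rw [← Int.mul_emod]
          _ = x ^ e % n := by
              congr 1; rw [← pow_add]; congr 1; omega
      · rw [if_neg (by omega)]
        calc x * (x ^ (e / 2) % n) * (x ^ (e / 2) % n) % n
            = x * x ^ (e / 2) * x ^ (e / 2) % n :=
              ((Int.ModEq.refl x).mul (Int.emod_emod_of_dvd _ dvd_rfl)).mul
                (Int.emod_emod_of_dvd _ dvd_rfl)
          _ = x ^ e % n := by
              congr 1; rw [mul_assoc, ← pow_add, ← pow_succ']; congr 1; omega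

-- the iterative loop computes result * base^e mod n (positive modulus, positive exponent)
theorem powmodLoop_eq (n : Int) (hn : 0 < n) :
    ∀ e : Nat, 0 < e → ∀ r b : Int, powmodLoop e r b n = (r * b ^ e) % n := by
  intro e
  induction e using Nat.strong_induction_on with
  | _ e ih =>
    intro he r b
    rw [powmodLoop, if_neg (by omega : ¬ e = 0)]
    by_cases h1 : e / 2 = 0
    · have he1 : e = 1 := by omega
      subst he1
      simp [powmodLoop, PySem.Int.mod_eq_emod_of_pos hn]
    · have hlt : e / 2 < e := Nat.div_lt_self he (by norm_num)
      rw [ih (e / 2) hlt (by omega)]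
      simp only [PySem.Int.mod_eq_emod_of_pos hn]
      rcases Nat.mod_two_eq_zero_or_one e with h | h
      · rw [if_neg (by omega)]
        calc r * (b * b % n) ^ (e / 2) % n
            = r * (b * b) ^ (e / 2) % n :=
              (Int.ModEq.refl r).mul (Int.ModEq.pow (e / 2) (Int.emod_emod_of_dvd _ dvd_rfl))
          _ = (r * b ^ e) % n := by
              rw [show b * b = b ^ 2 by ring, ← pow_mul,
                show 2 * (e / 2) = e by omega]
      · rw [if_pos h]
        calc r * b % n * (b * b % n) ^ (e / 2) % n
            = r * b * (b * b) ^ (e / 2) % n :=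
              Int.ModEq.mul (Int.emod_emod_of_dvd _ dvd_rfl)
                (Int.ModEq.pow (e / 2) (Int.emod_emod_of_dvd _ dvd_rfl))
          _ = (r * b ^ e) % n := by
              rw [show b * b = b ^ 2 by ring, ← pow_mul, mul_assoc, ← pow_succ',
                show 2 * (e / 2) + 1 = e by omega]

-- both sides encrypt one character to the same number
theorem char_eq (x : Int) : degreeA x 257 2896456207 = powmodB x 257 2896456207 := by
  have hn : (0:Int) < 2896456207 := by norm_num
  rw [degreeA_eq_pow _ hn 257 (by norm_num) x, powmodB,
    powmodLoop_eq _ hn 257 (by norm_num), one_mul,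
    PySem.Int.mod_eq_emod_of_pos hn, pow_emod']

-- the public-key row of A's key table is the constant B uses
theorem keyA_head : PySem.List.pyGetD keysA 0 [] = [(257:Int), 2896456207] := rfl

-- ===== VERDICT (by name: the statement is the Claim_ definition above) =====
theorem encrypting_spec : Claim_equal_encrypting := by
  intro text _
  unfold Spec_encrypting encrypting encrypting_alt
  simp only [keyA_head,
    show PySem.List.pyGetD [(257:Int), 2896456207] 0 0 = 257 from rfl,
    show PySem.List.pyGetD [(257:Int), 2896456207] 1 0 = 2896456207 from rfl,
    show Int.toNat 257 = 257 from rfl,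
    show (29873 : Int) * 96959 = 2896456207 from rfl, List.append_assoc]
  congr 1
  rw [PySem.List.foldl_append_eq_flatMap (fun c : Char =>
    PySem.Int.toChars (degreeA (c.toNat : Int) 257 2896456207) ++ ['|']) text.toList []]
  simp only [List.nil_append]
  exact List.flatMap_congr (fun c _ => by rw [char_eq])
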